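-- pv_equiv track=rewrite | github.com/lourencomaciel/sift-gateway | src/sift_gateway/cli_main.py | _split_select_paths
-- ===== SOURCE A (Python) =====
-- def _split_select_paths(raw_values: list[str] | None) -> list[str]:
--     """Split ``--select`` values supporting repeated and comma-separated flags."""
--     values = raw_values or []
--     out: list[str] = []
--     for value in values:
--         for segment in value.split(","):
--             stripped = segment.strip()
--             if stripped:
--                 out.append(stripped)
--     return out
-- ===== SOURCE B (Python) =====
-- def _split_select_paths(raw_values):
--     """Split ``--select`` values supporting repeated and comma-separated flags."""
--     out = []
--     for value in (raw_values or []):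
--         buf = []   # committed characters of the current token (left-stripped, ends non-space)
--         pend = []  # whitespace seen after a committed character, kept only if more non-space follows
--         for ch in value:
--             if ch == ',':
--                 if buf:
--                     out.append(''.join(buf))
--                 buf = []
--                 pend = []
--             elif ch.isspace():
--                 if buf:
--                     pend.append(ch)
--             else:
--                 buf.extend(pend)
--                 pend = []
--                 buf.append(ch)
--         if buf:
--             out.append(''.join(buf))
--     return out
-- ===== Notes on version B (the rewrite author's own statement) =====
-- stated objective: alternative
-- what changed: A splits each value with str.split(',') and strips each segment with str.strip(); B never calls split or strip: it is a single character-level state machine over each value, maintaining a committed token buffer and a pending-whitespace buffer, emitting the token on commas and at end of value.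
import Mathlib
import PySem

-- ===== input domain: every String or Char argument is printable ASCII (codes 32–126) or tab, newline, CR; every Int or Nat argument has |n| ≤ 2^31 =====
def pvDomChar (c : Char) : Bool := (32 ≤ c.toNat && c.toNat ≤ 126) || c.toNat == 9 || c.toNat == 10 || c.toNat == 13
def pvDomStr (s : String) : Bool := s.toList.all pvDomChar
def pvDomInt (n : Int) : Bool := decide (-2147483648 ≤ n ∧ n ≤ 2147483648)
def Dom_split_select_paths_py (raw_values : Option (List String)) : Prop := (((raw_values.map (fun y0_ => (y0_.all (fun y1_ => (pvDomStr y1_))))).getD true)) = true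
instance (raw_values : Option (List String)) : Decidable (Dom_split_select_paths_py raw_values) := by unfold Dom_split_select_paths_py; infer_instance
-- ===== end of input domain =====

-- B replaces A's split/strip pipeline by a character-level state machine (token buffer + pending-whitespace buffer); same cost, different algorithm.

-- ===== PORT A =====
def split_select_paths_py (raw_values : Option (List String)) : List String :=
  let values := raw_values.getD []
  values.foldl (fun out value =>
    ((PySem.Str.split? value ",").getD []).foldl (fun out segment =>
      let stripped := PySem.Str.strip segment
      if stripped ≠ "" then out ++ [stripped] else out) out) []

-- ===== PORT B =====
-- one step of Source B's inner character loop; state = (out, buf, pend)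
def pvStep (s : List String × List Char × List Char) (ch : Char) : List String × List Char × List Char :=
  let (out, buf, pend) := s
  if ch = ',' then
    ((if buf ≠ [] then out ++ [String.ofList buf] else out), [], [])
  else if PySem.Chars.isspace ch then
    (out, buf, if buf ≠ [] then pend ++ [ch] else pend)
  else
    (out, buf ++ pend ++ [ch], [])

def split_select_paths_py_alt (raw_values : Option (List String)) : List String :=
  (raw_values.getD []).foldl (fun out value =>
    let st := value.toList.foldl pvStep (out, [], [])
    if st.2.1 ≠ [] then st.1 ++ [String.ofList st.2.1] else st.1) []

-- ===== PRECONDITION & SPEC =====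
def Spec_split_select_paths_py (raw_values : Option (List String)) (out : List String) : Prop := out = split_select_paths_py_alt raw_values
instance (raw_values : Option (List String)) (out : List String) : Decidable (Spec_split_select_paths_py raw_values out) := by unfold Spec_split_select_paths_py; infer_instance

-- ===== CLAIM (what is proved, stated in full; the proofs are below) =====
def Claim_equal_split_select_paths_py : Prop := ∀ (raw_values : Option (List String)), Dom_split_select_paths_py raw_values → Spec_split_select_paths_py raw_values (split_select_paths_py raw_values)

-- ===== LEMMAS AND PROOFS =====

-- The keep-the-nonempty-strip step of A.
def pvKeep (seg : String) : Option String :=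
  let stripped := PySem.Str.strip seg
  if stripped ≠ "" then some stripped else none

-- What one value contributes, on the character level.
def pvPiece (l : List Char) : List String :=
  (List.splitOnP (· == ',') l).filterMap (fun seg => pvKeep (String.ofList seg))

-- PySem's comma split is Mathlib's splitOnP on the character list.
theorem go_comma (fuel : Nat) : ∀ (l cur : List Char) (acc : List (List Char)), l.length ≤ fuel →
    PySem.Chars.splitOn.go [','] fuel l cur acc
      = acc.reverse ++ List.modifyHead (fun t => cur.reverse ++ t) (List.splitOnP (· == ',') l) := by
  induction fuel with
  | zero =>
    intro l cur acc h
    have hl : l = [] := List.eq_nil_of_length_eq_zero (Nat.le_zero.mp h)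
    subst hl
    simp [PySem.Chars.splitOn.go, List.splitOnP_nil]
  | succ fuel ih =>
    intro l cur acc h
    cases l with
    | nil => simp [PySem.Chars.splitOn.go, List.splitOnP_nil]
    | cons c rest =>
      by_cases hc : c = ','
      · subst hc
        have hp : List.isPrefixOf [','] (','::rest) = true := by
          simp [List.isPrefixOf]
        rw [show PySem.Chars.splitOn.go [','] (fuel+1) (','::rest) cur acc
            = PySem.Chars.splitOn.go [','] fuel (List.drop ([','].length) (','::rest)) [] (cur.reverse :: acc) by
          simp [PySem.Chars.splitOn.go, hp]]
        rw [ih _ _ _ (by simpa using Nat.le_of_succ_le_succ h)]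
        rw [List.splitOnP_cons]
        simp only [BEq.rfl, if_true]
        obtain ⟨hd, tl, hX⟩ := List.exists_cons_of_ne_nil (List.splitOnP_ne_nil (· == ',') rest)
        simp [hX]
      · have hp : List.isPrefixOf [','] (c::rest) = false := by
          simp [List.isPrefixOf]
          exact fun hcc => absurd hcc.symm hc
        rw [show PySem.Chars.splitOn.go [','] (fuel+1) (c::rest) cur acc
            = PySem.Chars.splitOn.go [','] fuel rest (c :: cur) acc by
          simp [PySem.Chars.splitOn.go, hp]]
        rw [ih _ _ _ (by simpa using Nat.le_of_succ_le_succ h)]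
        rw [List.splitOnP_cons]
        have hcb : (c == ',') = false := by simpa using hc
        rw [hcb]
        obtain ⟨hd, tl, hX⟩ := List.exists_cons_of_ne_nil (List.splitOnP_ne_nil (· == ',') rest)
        simp [hX]

theorem pysplit_comma (l : List Char) :
    PySem.Chars.splitOn l [','] = List.splitOnP (· == ',') l := by
  unfold PySem.Chars.splitOn
  rw [go_comma (l.length + 1) l [] [] (by omega)]
  obtain ⟨hd, tl, hX⟩ := List.exists_cons_of_ne_nil (List.splitOnP_ne_nil (· == ',') l)
  simp [hX]

-- The segments Python's value.split(",") yields, via the PySem bridge.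
theorem segs_eq (v : String) :
    (PySem.Str.split? v ",").getD []
      = (List.splitOnP (· == ',') v.toList).map String.ofList := by
  simp [PySem.Str.split?, PySem.Chars.split?, pysplit_comma]

-- A's inner loop over one value's segments, as a filterMap.
theorem inner_foldl (segs : List String) (out : List String) :
    segs.foldl (fun out segment =>
      let stripped := PySem.Str.strip segment
      if stripped ≠ "" then out ++ [stripped] else out) out
      = out ++ segs.filterMap pvKeep := by
  induction segs generalizing out with
  | nil => simp
  | cons s segs ih =>
    simp only [List.foldl_cons, List.filterMap_cons, ih, pvKeep]
    by_cases hs : PySem.Str.strip s ≠ ""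
    · simp [hs]
    · simp at hs; simp [hs]

-- A's whole fold computes the flatMap of per-value pieces.
theorem portA_eq (values : List String) :
    values.foldl (fun out value =>
      ((PySem.Str.split? value ",").getD []).foldl (fun out segment =>
        let stripped := PySem.Str.strip segment
        if stripped ≠ "" then out ++ [stripped] else out) out) []
      = values.flatMap (fun v => pvPiece v.toList) := by
  have hfun : (fun (out : List String) (value : String) =>
      ((PySem.Str.split? value ",").getD []).foldl (fun out segment =>
        let stripped := PySem.Str.strip segment
        if stripped ≠ "" then out ++ [stripped] else out) out)
      = fun out value => out ++ pvPiece value.toList := by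
    funext out value
    rw [inner_foldl, segs_eq, List.filterMap_map]
    rfl
  rw [hfun, PySem.List.foldl_append_eq_flatMap]
  exact List.nil_append _

-- ===== B-side lemmas =====

theorem comma_not_ws : PySem.Chars.isspace ',' = false := by decide

-- splitting a comma-free list is the identity
theorem splitOnP_no_comma (l : List Char) (h : ',' ∉ l) :
    List.splitOnP (· == ',') l = [l] := by
  induction l with
  | nil => simp [List.splitOnP_nil]
  | cons c rest ih =>
    have hc : (c == ',') = false := by
      simp; intro hcc; exact h (hcc ▸ List.mem_cons_self)
    rw [List.splitOnP_cons, hc]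
    simp only [Bool.false_eq_true, if_false]
    rw [ih (fun hm => h (List.mem_cons_of_mem _ hm))]
    rfl

theorem splitOnP_comma_append (a b : List Char) :
    List.splitOnP (· == ',') (a ++ ','::b)
      = List.splitOnP (· == ',') a ++ List.splitOnP (· == ',') b := by
  induction a with
  | nil => simp [List.splitOnP_cons, List.splitOnP_nil]
  | cons c a ih =>
    by_cases hc : c = ','
    · subst hc
      simp [List.splitOnP_cons, ih]
    · have hcb : (c == ',') = false := by simpa using hc
      simp only [List.cons_append, List.splitOnP_cons, hcb, Bool.false_eq_true, if_false, ih]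
      obtain ⟨hd, tl, hX⟩ := List.exists_cons_of_ne_nil (List.splitOnP_ne_nil (· == ',') a)
      simp [hX]

-- strip of an ofList, and emptiness of an ofList, on the character level
theorem str_strip_ofList (x : List Char) :
    PySem.Str.strip (String.ofList x) = String.ofList (PySem.Chars.strip x) := by
  simp [PySem.Str.strip]

theorem pvKeep_ofList (x : List Char) :
    pvKeep (String.ofList x)
      = if PySem.Chars.strip x = [] then none else some (String.ofList (PySem.Chars.strip x)) := by
  by_cases h : PySem.Chars.strip x = [] <;>
    simp [pvKeep, str_strip_ofList, h]

-- strip drops a leading whitespace char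
theorem strip_cons_ws (c : Char) (l : List Char) (h : PySem.Chars.isspace c = true) :
    PySem.Chars.strip (c :: l) = PySem.Chars.strip l := by
  simp [PySem.Chars.strip, PySem.Chars.lstrip, h]

-- rstrip ignores a trailing block of whitespace
theorem rstrip_append_ws (b p : List Char) (h : ∀ x ∈ p, PySem.Chars.isspace x = true) :
    PySem.Chars.rstrip (b ++ p) = PySem.Chars.rstrip b := by
  simp only [PySem.Chars.rstrip, List.reverse_append, List.dropWhile_append]
  have hp : List.dropWhile PySem.Chars.isspace p.reverse = [] := by
    rw [List.dropWhile_eq_nil_iff]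
    intro x hx; exact h x (List.mem_reverse.mp hx)
  simp [hp]

-- rstrip of a list ending in a non-whitespace char is the list itself
theorem rstrip_last (l : List Char)
    (hlast : ∀ c, l.getLast? = some c → PySem.Chars.isspace c = false) :
    PySem.Chars.rstrip l = l := by
  cases hl : l with
  | nil => simp [PySem.Chars.rstrip]
  | cons x xs =>
    obtain ⟨lc, hlc⟩ : ∃ lc, (x :: xs).getLast? = some lc := by
      cases h : (x :: xs).getLast? with
      | none => exact absurd (List.getLast?_eq_none_iff.mp h) (List.cons_ne_nil x xs)
      | some lc => exact ⟨lc, rfl⟩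
    have hlcw : PySem.Chars.isspace lc = false := hlast lc (hl ▸ hlc)
    have hrev : (x :: xs).reverse.head? = some lc := by
      rw [List.head?_reverse]; exact hlc
    obtain ⟨tl, hrv⟩ : ∃ tl, (x :: xs).reverse = lc :: tl := by
      cases hr : (x :: xs).reverse with
      | nil => rw [hr] at hrev; simp at hrev
      | cons y ys =>
        rw [hr] at hrev; simp at hrev
        exact ⟨ys, by rw [hrev]⟩
    simp only [PySem.Chars.rstrip, hrv, List.dropWhile_cons, hlcw]
    simp only [Bool.false_eq_true, if_false]
    rw [← hrv, List.reverse_reverse]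

-- the strip of buf ++ pend is buf, under the scan invariants
theorem strip_buf_pend (buf pend : List Char) (hbuf : buf ≠ [])
    (hhead : ∀ c, buf.head? = some c → PySem.Chars.isspace c = false)
    (hlast : ∀ c, buf.getLast? = some c → PySem.Chars.isspace c = false)
    (hpend : ∀ x ∈ pend, PySem.Chars.isspace x = true) :
    PySem.Chars.strip (buf ++ pend) = buf := by
  obtain ⟨c, rest, hb⟩ := List.exists_cons_of_ne_nil hbuf
  subst hb
  have hc : PySem.Chars.isspace c = false := hhead c rfl
  simp only [PySem.Chars.strip, PySem.Chars.lstrip, List.cons_append,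
    List.dropWhile_cons, hc, Bool.false_eq_true, if_false]
  rw [show c :: (rest ++ pend) = (c :: rest) ++ pend by simp]
  rw [rstrip_append_ws _ _ hpend]
  exact rstrip_last _ hlast

-- pvPiece of a comma-free buf ++ pend block, under the invariants
theorem piece_buf_pend (buf pend : List Char)
    (hbp : buf = [] → pend = [])
    (hhead : ∀ c, buf.head? = some c → PySem.Chars.isspace c = false)
    (hlast : ∀ c, buf.getLast? = some c → PySem.Chars.isspace c = false)
    (hpend : ∀ x ∈ pend, PySem.Chars.isspace x = true)
    (hnc : ',' ∉ buf) (hncp : ',' ∉ pend) :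
    pvPiece (buf ++ pend) = if buf ≠ [] then [String.ofList buf] else [] := by
  have hsplit : List.splitOnP (· == ',') (buf ++ pend) = [buf ++ pend] := by
    apply splitOnP_no_comma
    intro hm
    rcases List.mem_append.mp hm with h | h
    · exact hnc h
    · exact hncp h
  unfold pvPiece
  rw [hsplit]
  simp only [List.filterMap_cons, List.filterMap_nil, pvKeep_ofList]
  by_cases hb : buf = []
  · subst hb
    rw [hbp rfl]
    simp [PySem.Chars.strip, PySem.Chars.lstrip, PySem.Chars.rstrip]
  · rw [strip_buf_pend buf pend hb hhead hlast hpend]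
    simp [hb]

-- a leading whitespace non-comma char does not change the pieces
theorem piece_cons_ws (c : Char) (rest : List Char)
    (hw : PySem.Chars.isspace c = true) (hc : c ≠ ',') :
    pvPiece (c :: rest) = pvPiece rest := by
  unfold pvPiece
  rw [List.splitOnP_cons]
  have hcb : (c == ',') = false := by simpa using hc
  rw [hcb]
  simp only [Bool.false_eq_true, if_false]
  obtain ⟨hd, tl, hX⟩ := List.exists_cons_of_ne_nil (List.splitOnP_ne_nil (· == ',') rest)
  rw [hX]
  simp only [List.modifyHead_cons, List.filterMap_cons, pvKeep_ofList, strip_cons_ws c hd hw]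

-- the main scan invariant: B's inner character loop computes out ++ pvPiece (buf ++ pend ++ l)
theorem scan_main : ∀ (l : List Char) (out : List String) (buf pend : List Char),
    (buf = [] → pend = []) →
    (∀ c, buf.head? = some c → PySem.Chars.isspace c = false) →
    (∀ c, buf.getLast? = some c → PySem.Chars.isspace c = false) →
    (∀ x ∈ pend, PySem.Chars.isspace x = true) →
    (',' ∉ buf) →
    (let st := l.foldl pvStep (out, buf, pend)
     if st.2.1 ≠ [] then st.1 ++ [String.ofList st.2.1] else st.1)
      = out ++ pvPiece (buf ++ pend ++ l) := by
  intro l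
  induction l with
  | nil =>
    intro out buf pend hbp hhead hlast hpend hnc
    have hncp : ',' ∉ pend := fun hm => by
      have := hpend ',' hm; rw [comma_not_ws] at this; exact Bool.false_ne_true this
    simp only [List.foldl_nil, List.append_nil]
    rw [piece_buf_pend buf pend hbp hhead hlast hpend hnc hncp]
    by_cases hb : buf = [] <;> simp [hb]
  | cons c rest ih =>
    intro out buf pend hbp hhead hlast hpend hnc
    have hncp : ',' ∉ pend := fun hm => by
      have := hpend ',' hm; rw [comma_not_ws] at this; exact Bool.false_ne_true this
    rw [List.foldl_cons]
    by_cases hc : c = ','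
    · subst hc
      have hstep : pvStep (out, buf, pend) ','
          = ((if buf ≠ [] then out ++ [String.ofList buf] else out), [], []) := by
        simp [pvStep]
      rw [hstep]
      rw [ih _ [] [] (fun _ => rfl) (by simp) (by simp) (by simp) (by simp)]
      have hA : buf ++ pend ++ ','::rest = (buf ++ pend) ++ ','::rest := by simp
      rw [hA]
      unfold pvPiece
      rw [splitOnP_comma_append, List.filterMap_append]
      have := piece_buf_pend buf pend hbp hhead hlast hpend hnc hncp
      unfold pvPiece at this
      rw [this]
      by_cases hb : buf = [] <;> simp [hb]
    · by_cases hw : PySem.Chars.isspace c = true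
      · by_cases hb : buf = []
        · subst hb
          have hp0 : pend = [] := hbp rfl
          subst hp0
          have hstep : pvStep (out, [], []) c = (out, [], []) := by
            simp [pvStep, hc, hw]
          rw [hstep, ih out [] [] (fun _ => rfl) (by simp) (by simp) (by simp) (by simp)]
          simp only [List.nil_append]
          rw [piece_cons_ws c rest hw hc]
        · have hstep : pvStep (out, buf, pend) c = (out, buf, pend ++ [c]) := by
            simp [pvStep, hc, hw, hb]
          rw [hstep, ih _ buf (pend ++ [c]) (fun h => absurd h hb) hhead hlast
            (by intro x hx
                rcases List.mem_append.mp hx with h | h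
                · exact hpend x h
                · simp at h; rw [h]; exact hw) hnc]
          congr 2
          simp
      · have hstep : pvStep (out, buf, pend) c = (out, buf ++ pend ++ [c], []) := by
          simp [pvStep, hc, hw]
        rw [hstep]
        rw [ih _ (buf ++ pend ++ [c]) [] (by simp) ?_ ?_ (by simp) ?_]
        · congr 2
          simp
        · intro d hd
          by_cases hb : buf = []
          · subst hb; rw [hbp rfl] at hd
            simp at hd
            rw [← hd]
            exact Bool.eq_false_iff.mpr hw
          · obtain ⟨x, xs, hx⟩ := List.exists_cons_of_ne_nil hb
            subst hx
            simp at hd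
            rw [← hd]
            exact hhead x rfl
        · intro d hd
          simp at hd
          rw [← hd]
          exact Bool.eq_false_iff.mpr hw
        · intro hm
          rcases List.mem_append.mp hm with h | h
          · rcases List.mem_append.mp h with h1 | h1
            · exact hnc h1
            · have := hpend ',' h1; rw [comma_not_ws] at this; exact Bool.false_ne_true this
          · simp at h; exact hc h.symm

-- ===== VERDICT (by name: the statement is the Claim_ definition above) =====
theorem split_select_paths_py_spec : Claim_equal_split_select_paths_py := by
  unfold Claim_equal_split_select_paths_py
  intro raw_values _
  unfold Spec_split_select_paths_py split_select_paths_py split_select_paths_py_alt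
  simp only [portA_eq]
  have hfun : (fun (out : List String) (value : String) =>
      let st := value.toList.foldl pvStep (out, [], [])
      if st.2.1 ≠ [] then st.1 ++ [String.ofList st.2.1] else st.1)
      = fun out value => out ++ pvPiece value.toList := by
    funext out value
    have := scan_main value.toList out [] [] (fun _ => rfl) (by simp) (by simp) (by simp) (by simp)
    simpa using this
  rw [hfun, PySem.List.foldl_append_eq_flatMap]
  exact (List.nil_append _).symm ▸ rfl
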